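-- pv_equiv track=rewrite | github.com/pypi-data/pypi-mirror-400 | packages/sklearnk/sklearnk-0.5.1.tar.gz/sklearnk-0.5.1/sklearnk/__init__.py | _get_executable_code
-- ===== SOURCE A (Python) =====
-- def _get_executable_code(source):
--     """Convert source code to executable form by removing __name__ guard"""
--     lines = source.split('\n')
--     result = []
--     skip_next = False
--
--     for i, line in enumerate(lines):
--         # Skip the if __name__ == '__main__': line and unindent its contents
--         if "if __name__ == '__main__':" in line or 'if __name__ == "__main__":' in line:
--             skip_next = True
--             continue
--
--         if skip_next and line.strip():
--             # Unindent the code that was inside the if block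
--             result.append(line[4:] if line.startswith('    ') else line)
--         elif not skip_next:
--             result.append(line)
--
--     return '\n'.join(result)
-- ===== SOURCE B (Python) =====
-- def _get_executable_code(source):
--     """Convert source code to executable form by removing __name__ guard"""
--     lines = source.split('\n')
--
--     def is_guard(line):
--         return "if __name__ == '__main__':" in line or 'if __name__ == "__main__":' in line
--
--     idx = next((i for i, line in enumerate(lines) if is_guard(line)), None)
--     if idx is None:
--         return '\n'.join(lines)
--     head = lines[:idx]
--     tail = [line[4:] if line.startswith('    ') else line
--             for line in lines[idx + 1:]
--             if not is_guard(line) and line.strip()]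
--     return '\n'.join(head + tail)
-- ===== Notes on version B (the rewrite author's own statement) =====
-- stated objective: simpler
-- what changed: Replaces A's single flag-carrying loop by locating the first guard line once, keeping the prefix verbatim and building the suffix with one filtering/unindenting comprehension (all-drop of guard and blank lines happens only in the suffix pass).
import Mathlib
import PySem

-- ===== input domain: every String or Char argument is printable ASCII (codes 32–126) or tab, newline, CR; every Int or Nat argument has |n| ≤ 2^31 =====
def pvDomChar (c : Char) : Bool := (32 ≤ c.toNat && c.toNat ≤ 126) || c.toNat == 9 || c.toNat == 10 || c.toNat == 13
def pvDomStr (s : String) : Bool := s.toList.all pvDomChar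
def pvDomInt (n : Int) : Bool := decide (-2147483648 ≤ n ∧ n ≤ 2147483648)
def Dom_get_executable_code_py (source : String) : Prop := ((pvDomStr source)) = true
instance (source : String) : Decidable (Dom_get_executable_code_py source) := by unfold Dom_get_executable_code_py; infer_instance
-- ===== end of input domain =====

-- B replaces A's flag-carrying single loop by locating the first guard line once, keeping the
-- prefix verbatim and filtering/unindenting the suffix in one comprehension (objective: simpler).

-- ===== PORT A =====
-- 'guard in line' test of A's first branch (both quote forms)
def pvGuardA (line : String) : Bool :=
  PySem.Str.isIn "if __name__ == '__main__':" line ||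
  PySem.Str.isIn "if __name__ == \"__main__\":" line

-- A's loop body: state = (result, skip_next)
def pvAStep (acc : List String × Bool) (line : String) : List String × Bool :=
  if pvGuardA line then (acc.1, true)
  else if acc.2 && PySem.Str.strip line ≠ "" then
    (acc.1 ++ [if PySem.Str.startswith line "    " then PySem.Str.slice line (some 4) none else line], acc.2)
  else if !acc.2 then (acc.1 ++ [line], acc.2)
  else acc

def get_executable_code_py (source : String) : String :=
  let lines := (PySem.Str.split? source "\n").getD []
  PySem.Str.join "\n" (lines.foldl pvAStep ([], false)).1

-- ===== PORT B =====
-- Source B's is_guard helper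
def pvGuardB (line : String) : Bool :=
  PySem.Str.isIn "if __name__ == '__main__':" line ||
  PySem.Str.isIn "if __name__ == \"__main__\":" line

-- Source B's tail comprehension body (filter + unindent)
def pvTailB (line : String) : Option String :=
  if pvGuardB line || PySem.Str.strip line == "" then none
  else some (if PySem.Str.startswith line "    " then PySem.Str.slice line (some 4) none else line)

def get_executable_code_py_alt (source : String) : String :=
  let lines := (PySem.Str.split? source "\n").getD []
  match lines.findIdx? pvGuardB with
  | none => PySem.Str.join "\n" lines
  | some i => PySem.Str.join "\n" (lines.take i ++ (lines.drop (i + 1)).filterMap pvTailB)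

-- ===== PRECONDITION & SPEC =====
def Spec_get_executable_code_py (source : String) (out : String) : Prop := out = get_executable_code_py_alt source
instance (source : String) (out : String) : Decidable (Spec_get_executable_code_py source out) := by unfold Spec_get_executable_code_py; infer_instance

-- ===== CLAIM (what is proved, stated in full; the proofs are below) =====
def Claim_equal_get_executable_code_py : Prop := ∀ (source : String), Dom_get_executable_code_py source → Spec_get_executable_code_py source (get_executable_code_py source)

-- ===== LEMMAS AND PROOFS =====

-- A's and B's guard tests are literally the same expression
theorem pvGuard_eq (l : String) : pvGuardB l = pvGuardA l := rfl

theorem pvTailB_none {l : String} (h : pvGuardA l = true ∨ PySem.Str.strip l = "") :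
    pvTailB l = none := by
  unfold pvTailB; rw [pvGuard_eq]; rcases h with h | h <;> simp [h]

theorem pvTailB_some {l : String} (hg : pvGuardA l = false) (hs : ¬ PySem.Str.strip l = "") :
    pvTailB l = some (if PySem.Str.startswith l "    " then PySem.Str.slice l (some 4) none else l) := by
  unfold pvTailB; rw [pvGuard_eq]; simp [hg, hs]

theorem pvAStep_guard {l : String} (acc : List String × Bool) (hg : pvGuardA l = true) :
    pvAStep acc l = (acc.1, true) := by simp [pvAStep, hg]

theorem pvAStep_skip_drop {l : String} (acc : List String) (hg : pvGuardA l = false)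
    (hs : PySem.Str.strip l = "") : pvAStep (acc, true) l = (acc, true) := by
  simp [pvAStep, hg, hs]

theorem pvAStep_skip_keep {l : String} (acc : List String) (hg : pvGuardA l = false)
    (hs : ¬ PySem.Str.strip l = "") :
    pvAStep (acc, true) l =
      (acc ++ [if PySem.Str.startswith l "    " then PySem.Str.slice l (some 4) none else l], true) := by
  simp [pvAStep, hg, hs]

theorem pvAStep_copy {l : String} (acc : List String) (hg : pvGuardA l = false) :
    pvAStep (acc, false) l = (acc ++ [l], false) := by
  simp [pvAStep, hg]

-- once skip_next is true it stays true and A appends exactly B's filtered/unindented lines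
theorem pvA_skip_phase (lines : List String) (acc : List String) :
    lines.foldl pvAStep (acc, true) = (acc ++ lines.filterMap pvTailB, true) := by
  induction lines generalizing acc with
  | nil => simp
  | cons l ls ih =>
    rw [List.foldl_cons]
    by_cases hg : pvGuardA l
    · rw [pvAStep_guard _ hg, List.filterMap_cons, pvTailB_none (Or.inl hg)]
      exact ih acc
    · have hg' : pvGuardA l = false := by simpa using hg
      by_cases hs : PySem.Str.strip l = ""
      · rw [pvAStep_skip_drop acc hg' hs, List.filterMap_cons, pvTailB_none (Or.inr hs)]
        exact ih acc
      · rw [pvAStep_skip_keep acc hg' hs, List.filterMap_cons, pvTailB_some hg' hs, ih]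
        simp

-- before any guard line A copies lines verbatim; at the first guard it switches to the skip phase
theorem pvA_scan_phase (lines : List String) (acc : List String) :
    (lines.foldl pvAStep (acc, false)).1 =
      match lines.findIdx? pvGuardB with
      | none => acc ++ lines
      | some i => acc ++ (lines.take i ++ (lines.drop (i + 1)).filterMap pvTailB) := by
  induction lines generalizing acc with
  | nil => simp
  | cons l ls ih =>
    by_cases hg : pvGuardA l
    · have hgb : pvGuardB l = true := by rw [pvGuard_eq]; exact hg
      rw [List.foldl_cons, pvAStep_guard _ hg]
      simp [List.findIdx?_cons, hgb, pvA_skip_phase]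
    · have hgb' : pvGuardA l = false := by simpa using hg
      have hgb : pvGuardB l = false := by rw [pvGuard_eq]; exact hgb'
      rw [List.foldl_cons, pvAStep_copy acc hgb', ih]
      cases h : ls.findIdx? pvGuardB with
      | none => simp [List.findIdx?_cons, hgb, h]
      | some i => simp [List.findIdx?_cons, hgb, h]

-- ===== VERDICT (by name: the statement is the Claim_ definition above) =====
theorem get_executable_code_py_spec : Claim_equal_get_executable_code_py := by
  intro source _
  unfold Spec_get_executable_code_py get_executable_code_py get_executable_code_py_alt
  simp only []
  rw [pvA_scan_phase]
  cases h : ((PySem.Str.split? source "\n").getD []).findIdx? pvGuardB with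
  | none => simp
  | some i => simp [h]
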